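-- pv_equiv track=rewrite | github.com/BpsEason/iphone-price-tracker-pro | backend/seed.py | map_to_model
-- ===== SOURCE A (Python) =====
-- MODEL_DEFINITIONS = [
--     {"name": "iPhone 17 Pro Max", "keywords": ["17 PRO MAX", "17PROMAX"]},
--     {"name": "iPhone 17 Pro", "keywords": ["17 PRO", "17PRO"]},
--     {"name": "iPhone 17 Slim", "keywords": ["17 SLIM", "17SLIM", "17 AIR"]},
--     {"name": "iPhone 17", "keywords": ["IPHONE 17", "IPHONE17"]},
-- ]
--
-- def map_to_model(product_name):
--     if not product_name: return None
--     name_upper = product_name.upper().replace(" ", "")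
--     sorted_defs = sorted(MODEL_DEFINITIONS, key=lambda x: len(x['name']), reverse=True)
--     for model in sorted_defs:
--         for kw in model["keywords"]:
--             if kw.upper().replace(" ", "") in name_upper:
--                 return model["name"]
--     return None
-- ===== SOURCE B (Python) =====
-- MODEL_DEFINITIONS = [
--     {"name": "iPhone 17 Pro Max", "keywords": ["17 PRO MAX", "17PROMAX"]},
--     {"name": "iPhone 17 Pro", "keywords": ["17 PRO", "17PRO"]},
--     {"name": "iPhone 17 Slim", "keywords": ["17 SLIM", "17SLIM", "17 AIR"]},
--     {"name": "iPhone 17", "keywords": ["IPHONE 17", "IPHONE17"]},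
-- ]
--
-- def map_to_model(product_name):
--     if not product_name: return None
--     name_upper = product_name.upper().replace(" ", "")
--     matches = [m["name"] for m in MODEL_DEFINITIONS
--                if any(kw.upper().replace(" ", "") in name_upper for kw in m["keywords"])]
--     if not matches: return None
--     return max(matches, key=lambda n: len(n))
-- ===== Notes on version B (the rewrite author's own statement) =====
-- stated objective: simpler
-- what changed: Replaces the sort-then-first-hit scan with a gather-then-max: collect every matching model name in original definition order, then pick the longest via max(key=len); no sorting of MODEL_DEFINITIONS and no early-return nested loop.
import Mathlib
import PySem

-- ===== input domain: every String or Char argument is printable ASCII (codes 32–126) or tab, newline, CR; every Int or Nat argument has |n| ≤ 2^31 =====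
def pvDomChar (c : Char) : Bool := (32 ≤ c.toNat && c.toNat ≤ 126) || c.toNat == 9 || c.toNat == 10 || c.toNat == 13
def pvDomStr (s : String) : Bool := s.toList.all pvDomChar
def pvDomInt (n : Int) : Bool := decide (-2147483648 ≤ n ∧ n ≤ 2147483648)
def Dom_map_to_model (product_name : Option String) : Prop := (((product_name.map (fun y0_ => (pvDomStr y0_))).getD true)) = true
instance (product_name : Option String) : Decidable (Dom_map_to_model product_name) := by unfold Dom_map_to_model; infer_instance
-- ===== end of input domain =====

-- B replaces A's sort-then-first-hit scan by collecting all matching names and taking the longest (simpler decomposition).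

-- MODEL_DEFINITIONS as (name, keywords) pairs, shared module constant
def modelDefs : List (String × List String) :=
  [("iPhone 17 Pro Max", ["17 PRO MAX", "17PROMAX"]),
   ("iPhone 17 Pro", ["17 PRO", "17PRO"]),
   ("iPhone 17 Slim", ["17 SLIM", "17SLIM", "17 AIR"]),
   ("iPhone 17", ["IPHONE 17", "IPHONE17"])]

-- kw.upper().replace(" ", "")
def normKw (kw : String) : String := PySem.Str.replace (PySem.Str.upper kw) " " ""

-- ===== PORT A =====
-- inner 'for kw in model["keywords"]: if …: return model["name"]' (as a found-flag loop)
def innerA (kws : List String) (nameUpper : String) : Bool :=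
  match kws with
  | [] => false
  | kw :: rest => if PySem.Str.isIn (normKw kw) nameUpper then true else innerA rest nameUpper

-- outer 'for model in sorted_defs: …'
def outerA (defs : List (String × List String)) (nameUpper : String) : Option String :=
  match defs with
  | [] => none
  | (n, kws) :: rest => if innerA kws nameUpper then some n else outerA rest nameUpper

def map_to_model (product_name : Option String) : Option String :=
  match product_name with
  | none => none
  | some s =>
    if s = "" then none
    else
      let nameUpper := PySem.Str.replace (PySem.Str.upper s) " " ""
      let sortedDefs := PySem.List.sorted modelDefs (fun x => PySem.Str.len x.1) true
      outerA sortedDefs nameUpper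

-- ===== PORT B =====
def map_to_model_alt (product_name : Option String) : Option String :=
  match product_name with
  | none => none
  | some s =>
    if s = "" then none
    else
      let nameUpper := PySem.Str.replace (PySem.Str.upper s) " " ""
      let hits := modelDefs.filterMap (fun m =>
        if m.2.any (fun kw => PySem.Str.isIn (normKw kw) nameUpper) then some m.1 else none)
      match PySem.List.max? hits (fun n => PySem.Str.len n) with
      | none => none
      | some m => some m

-- ===== PRECONDITION & SPEC =====
def Spec_map_to_model (product_name : Option String) (out : Option String) : Prop := out = map_to_model_alt product_name
instance (product_name : Option String) (out : Option String) : Decidable (Spec_map_to_model product_name out) := by unfold Spec_map_to_model; infer_instance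

-- ===== CLAIM (what is proved, stated in full; the proofs are below) =====
def Claim_equal_map_to_model : Prop := ∀ (product_name : Option String), Dom_map_to_model product_name → Spec_map_to_model product_name (map_to_model product_name)

-- ===== LEMMAS AND PROOFS =====

-- the descending-length sort of the four definitions, named once
theorem sorted_modelDefs :
    PySem.List.sorted modelDefs (fun x => PySem.Str.len x.1) true =
      [("iPhone 17 Pro Max", ["17 PRO MAX", "17PROMAX"]),
       ("iPhone 17 Slim", ["17 SLIM", "17SLIM", "17 AIR"]),
       ("iPhone 17 Pro", ["17 PRO", "17PRO"]),
       ("iPhone 17", ["IPHONE 17", "IPHONE17"])] := by decide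

-- normalized forms of the nine keyword literals
theorem nk1 : normKw "17 PRO MAX" = "17PROMAX" := by decide
theorem nk2 : normKw "17PROMAX" = "17PROMAX" := by decide
theorem nk3 : normKw "17 PRO" = "17PRO" := by decide
theorem nk4 : normKw "17PRO" = "17PRO" := by decide
theorem nk5 : normKw "17 SLIM" = "17SLIM" := by decide
theorem nk6 : normKw "17SLIM" = "17SLIM" := by decide
theorem nk7 : normKw "17 AIR" = "17AIR" := by decide
theorem nk8 : normKw "IPHONE 17" = "IPHONE17" := by decide
theorem nk9 : normKw "IPHONE17" = "IPHONE17" := by decide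

-- ===== VERDICT (by name: the statement is the Claim_ definition above) =====
theorem map_to_model_spec : Claim_equal_map_to_model := by
  intro p _
  unfold Spec_map_to_model map_to_model map_to_model_alt
  cases p with
  | none => rfl
  | some s =>
    by_cases hs : s = ""
    · simp [hs]
    · simp only [hs, if_false, sorted_modelDefs]
      simp only [modelDefs, outerA, innerA, List.filterMap_cons, List.filterMap_nil,
        List.any_cons, List.any_nil, nk1, nk2, nk3, nk4, nk5, nk6, nk7, nk8, nk9,
        Bool.or_false]
      cases h1 : PySem.Str.isIn "17PROMAX" (PySem.Str.replace (PySem.Str.upper s) " " "") <;>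
      cases h2 : PySem.Str.isIn "17SLIM" (PySem.Str.replace (PySem.Str.upper s) " " "") <;>
      cases h3 : PySem.Str.isIn "17AIR" (PySem.Str.replace (PySem.Str.upper s) " " "") <;>
      cases h4 : PySem.Str.isIn "17PRO" (PySem.Str.replace (PySem.Str.upper s) " " "") <;>
      cases h5 : PySem.Str.isIn "IPHONE17" (PySem.Str.replace (PySem.Str.upper s) " " "") <;>
        simp_all <;> decide
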